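-- pv_equiv track=rewrite | github.com/luisconceicaodev/University-Projects | Programação II/PRJ_48303.py | crimes_por_data
-- ===== SOURCE A (Python) =====
-- from itertools import groupby
--
-- def crimes_por_data(tabela):
--     """
--     Esta função recebe uma lista de dicionários e devolve um par de listas:
--     abcissas e ordenadas. As abcissas contêm as datas dos crimes por ordem
--     crescente; as ordenadas contêm o número de crimes que ocorreram em cada data.
--
--     Requires: tabela é uma lista de dicionários representando os dados
--     de um ficheiro CSV com dados sobre crimes.
--     Ensures: retorna um par de listas: abcissas e ordenadas.
--     """
--     coordenadas = []
--     abcissas = []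
--     ordenadas = []
--
--     for item in tabela:
--         soma = 0
--         x = item["CrimeDate"]
--         x = x.replace("/","")
--         novo_formato = ""
--         novo_formato += x[4:]
--         novo_formato += x[:2]
--         novo_formato += x[2:4]
--         abcissas.append(novo_formato)
--     abcissas.sort()
--     ordenadas = [len(list(group)) for key, group in groupby(abcissas)]
--     abcissas = sorted(set(abcissas))
--     coordenadas.append(abcissas)
--     coordenadas.append(ordenadas)
--     return coordenadas
-- ===== SOURCE B (Python) =====
-- from collections import Counter
--
-- def crimes_por_data(tabela):
--     def novo_formato(item):
--         x = item["CrimeDate"].replace("/", "")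
--         return x[4:] + x[:2] + x[2:4]
--     counts = Counter(novo_formato(item) for item in tabela)
--     abcissas = sorted(counts)
--     return [abcissas, [counts[d] for d in abcissas]]
-- ===== Notes on version B (the rewrite author's own statement) =====
-- stated objective: simpler
-- what changed: Replaces the sort-whole-list + itertools.groupby run-counting (plus a second sorted(set(...)) pass) with a single-pass Counter over the transformed dates followed by one sort of the distinct keys.
import Mathlib
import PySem

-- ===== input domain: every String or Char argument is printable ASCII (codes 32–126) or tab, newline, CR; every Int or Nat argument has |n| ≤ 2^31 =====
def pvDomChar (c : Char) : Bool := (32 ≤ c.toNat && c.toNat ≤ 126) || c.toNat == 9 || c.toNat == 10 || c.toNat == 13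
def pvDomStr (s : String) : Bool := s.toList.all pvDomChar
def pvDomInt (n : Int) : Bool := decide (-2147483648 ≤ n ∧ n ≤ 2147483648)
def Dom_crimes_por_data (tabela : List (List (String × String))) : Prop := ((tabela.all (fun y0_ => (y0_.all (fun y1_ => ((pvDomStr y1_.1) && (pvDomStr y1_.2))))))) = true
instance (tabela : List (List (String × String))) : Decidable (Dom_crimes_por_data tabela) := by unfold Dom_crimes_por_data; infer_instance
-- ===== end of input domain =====

-- B replaces A's sort + groupby run-counting with a one-pass Counter plus a sort of the distinct keys;
-- equal return value proved on all inputs where every row has a "CrimeDate" key (A raises KeyError otherwise).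

-- ===== PORT A =====
-- shared by both ports: x = s.replace("/",""); x[4:] + x[:2] + x[2:4]  (both Pythons compute this same expression)
def pvNovoFormato (s : String) : String :=
  let x := PySem.Str.replace s "/" ""
  PySem.Str.slice x (some 4) none ++ PySem.Str.slice x none (some 2) ++ PySem.Str.slice x (some 2) (some 4)

-- item["CrimeDate"] (first-match dict lookup; `.getD ""` is unreachable under Pre_)
def pvCrimeDate (item : List (String × String)) : String :=
  (PySem.Dict.get? (PySem.Dict.mk item) "CrimeDate").getD ""

-- len(list(group)) for key, group in groupby(ys) : run lengths of a list
def pvRunLengths : List String → List Int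
  | [] => []
  | x :: t =>
      (1 + (t.takeWhile (· == x)).length : Int) :: pvRunLengths (t.dropWhile (· == x))
  termination_by l => l.length
  decreasing_by
    simp only [List.length_cons]
    exact Nat.lt_succ_of_le (List.length_dropWhile_le _ _)

def crimes_por_data (tabela : List (List (String × String))) : List String × List Int :=
  let abcissas := tabela.foldl (fun acc item => acc ++ [pvNovoFormato (pvCrimeDate item)]) []
  let abcissas := PySem.List.sorted abcissas (fun x => x)   -- abcissas.sort()
  let ordenadas := pvRunLengths abcissas                    -- groupby run lengths
  let abcissas := PySem.List.sorted (PySem.Set.ofList abcissas) (fun x => x)  -- sorted(set(abcissas))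
  (abcissas, ordenadas)

-- ===== PORT B =====
def crimes_por_data_alt (tabela : List (List (String × String))) : List String × List Int :=
  let counts := PySem.Dict.counter (tabela.map (fun item => pvNovoFormato (pvCrimeDate item)))
  let abcissas := PySem.List.sorted counts.keys (fun x => x)  -- sorted(counts)
  (abcissas, abcissas.map (fun d => counts.getD d 0))

-- ===== PRECONDITION & SPEC =====
-- Pre_ excludes exactly the rows without a "CrimeDate" key, on which A raises KeyError.
def Pre_crimes_por_data (tabela : List (List (String × String))) : Prop :=
  ∀ item ∈ tabela, (PySem.Dict.get? (PySem.Dict.mk item) "CrimeDate").isSome = true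
instance (tabela : List (List (String × String))) : Decidable (Pre_crimes_por_data tabela) := by unfold Pre_crimes_por_data; infer_instance

def pvWitness_crimes_por_data : (List (List (String × String))) :=
  [[("CrimeDate", "11/22/2019")], [("CrimeDate", "01/03/2018"), ("Weapon", "KNIFE")], [("CrimeDate", "11/22/2019")]]

def Spec_crimes_por_data (tabela : List (List (String × String))) (out : List String × List Int) : Prop := out = crimes_por_data_alt tabela
instance (tabela : List (List (String × String))) (out : List String × List Int) : Decidable (Spec_crimes_por_data tabela out) := by unfold Spec_crimes_por_data; infer_instance

-- ===== CLAIM (what is proved, stated in full; the proofs are below) =====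
def Claim_equal_crimes_por_data : Prop := ∀ (tabela : List (List (String × String))), Dom_crimes_por_data tabela → Pre_crimes_por_data tabela → Spec_crimes_por_data tabela (crimes_por_data tabela)

-- ===== LEMMAS AND PROOFS =====

lemma pv_dropWhile_head_false {p : String → Bool} {l : List String} {x : String} {xs : List String}
    (h : l.dropWhile p = x :: xs) : p x = false := by
  induction l with
  | nil => simp at h
  | cons a t ih =>
    rw [List.dropWhile_cons] at h
    by_cases hp : p a
    · simp [hp] at h; exact ih h
    · simp [hp] at h; simpa [← h.1] using hp

-- core: on a sorted list, groupby run lengths = counts of the sorted distinct values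
lemma pv_runLengths_eq (n : Nat) : ∀ (s : List String), s.length ≤ n → s.Pairwise (· ≤ ·) →
    pvRunLengths s
      = (PySem.List.sorted (PySem.Set.ofList s) (fun x => x)).map (fun d => (s.count d : Int)) := by
  induction n with
  | zero =>
    intro s hlen _
    have : s = [] := List.length_eq_zero_iff.mp (Nat.le_zero.mp hlen)
    subst this; simp [pvRunLengths]
  | succ n ih =>
    intro s hlen hs
    match s with
    | [] => simp [pvRunLengths]
    | x :: t =>
      have hxt : ∀ y ∈ t, x ≤ y := fun y hy => (List.pairwise_cons.mp hs).1 y hy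
      have hts : t.Pairwise (· ≤ ·) := (List.pairwise_cons.mp hs).2
      set run := t.takeWhile (· == x) with hrun
      set rest := t.dropWhile (· == x) with hrest
      have hsplit : run ++ rest = t := List.takeWhile_append_dropWhile
      have hrun_eq : ∀ y ∈ run, y = x := by
        intro y hy
        have := List.mem_takeWhile_imp hy
        exact eq_of_beq this
      -- every element of rest is > x
      have hrest_gt : ∀ y ∈ rest, x < y := by
        intro y hy
        match hr : rest with
        | [] => simp at hy
        | r :: rs =>
          have hdw : t.dropWhile (· == x) = r :: rs := by rw [← hrest]
          have hr0 : (r == x) = false := by simpa using pv_dropWhile_head_false hdw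
          have hrx : r ≠ x := by simpa using hr0
          have hrt : r ∈ t := hsplit ▸ List.mem_append.mpr (Or.inr List.mem_cons_self)
          have hxr : x < r := lt_of_le_of_ne (hxt r hrt) (Ne.symm hrx)
          rcases List.mem_cons.mp hy with h | h
          · exact h ▸ hxr
          · have hrestp : rest.Pairwise (· ≤ ·) := hts.sublist (List.dropWhile_sublist _)
            have : r ≤ y := by
              rw [hr] at hrestp
              exact (List.pairwise_cons.mp hrestp).1 y h
            exact lt_of_lt_of_le hxr this
      have hx_notin_rest : x ∉ rest := fun h => lt_irrefl x (hrest_gt x h)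
      have hrestp : rest.Pairwise (· ≤ ·) := hts.sublist (List.dropWhile_sublist _)
      have hrest_len : rest.length ≤ n := by
        have := List.length_dropWhile_le (· == x) t
        have ht : t.length ≤ n := Nat.lt_succ_iff.mp (by simpa using hlen)
        exact le_trans (hrest ▸ this) ht
      have ihr := ih rest hrest_len hrestp
      -- sorted(set(x::t)) = x :: sorted(set(rest))
      have hkey : PySem.List.sorted (PySem.Set.ofList (x :: t)) (fun x => x)
          = x :: PySem.List.sorted (PySem.Set.ofList rest) (fun x => x) := by
        apply PySem.List.sorted_eq_of_perm_of_pairwise_lt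
        · -- perm
          apply (List.perm_ext_iff_of_nodup _ (PySem.Set.nodup_ofList _)).mpr
          · intro a
            simp only [List.mem_cons, PySem.List.mem_sorted, PySem.Set.mem_ofList]
            constructor
            · rintro (h | h)
              · exact Or.inl h
              · exact Or.inr (hsplit ▸ List.mem_append.mpr (Or.inr h))
            · rintro (h | h)
              · exact Or.inl h
              · rcases List.mem_append.mp (hsplit ▸ h) with h | h
                · exact Or.inl (hrun_eq _ h)
                · exact Or.inr h
          · refine List.nodup_cons.mpr ⟨?_, ?_⟩
            · intro hx
              exact hx_notin_rest (by simpa [PySem.List.mem_sorted, PySem.Set.mem_ofList] using hx)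
            · exact (PySem.List.sorted_perm (PySem.Set.ofList rest) (fun x => x) false).symm.nodup (PySem.Set.nodup_ofList rest)
        · refine List.pairwise_cons.mpr ⟨?_, PySem.List.sorted_ofList_pairwise_lt _⟩
          intro y hy
          exact hrest_gt y (by simpa [PySem.List.mem_sorted, PySem.Set.mem_ofList] using hy)
      -- counts
      have hcount_x : (x :: t).count x = 1 + run.length := by
        rw [← hsplit]
        have h1 : run.count x = run.length := List.count_eq_length.mpr (fun b hb => (hrun_eq b hb).symm)
        have h2 : rest.count x = 0 := List.count_eq_zero.mpr hx_notin_rest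
        simp [List.count_append, h1, h2]
        omega
      have hcount_rest : ∀ d ∈ rest, (x :: t).count d = rest.count d := by
        intro d hd
        have hdx : d ≠ x := fun h => lt_irrefl x (h ▸ hrest_gt d hd)
        rw [← hsplit]
        have h1 : run.count d = 0 := List.count_eq_zero.mpr (fun h => hdx (hrun_eq d h))
        rw [List.count_cons_of_ne (Ne.symm hdx), List.count_append, h1, Nat.zero_add]
      rw [pvRunLengths, hkey, ← hrun, ← hrest, ihr]
      simp only [List.map_cons]
      congr 1
      · rw [show (1 + (run.length : Int)) = ((x :: t).count x : Int) by rw [hcount_x]; push_cast; ring]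
      · apply List.map_congr_left
        intro d hd
        have hdrest : d ∈ rest := by
          simpa [PySem.List.mem_sorted, PySem.Set.mem_ofList] using hd
        simp [hcount_rest d hdrest]

-- the two sorted-distinct lists agree: ofList of a permutation sorts the same
lemma pv_sorted_set_perm (xs : List String) :
    PySem.List.sorted (PySem.Set.ofList (PySem.List.sorted xs (fun x => x))) (fun x => x)
      = PySem.List.sorted (PySem.Set.ofList xs) (fun x => x) := by
  apply PySem.List.sorted_eq_sorted_of_perm _ _ _ (fun a b h => h)
  apply (List.perm_ext_iff_of_nodup (PySem.Set.nodup_ofList _) (PySem.Set.nodup_ofList _)).mpr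
  intro a
  simp [PySem.Set.mem_ofList, PySem.List.mem_sorted]

-- ===== VERDICT (by name: the statement is the Claim_ definition above) =====
theorem crimes_por_data_spec : Claim_equal_crimes_por_data := by
  intro tabela _ _
  unfold Spec_crimes_por_data crimes_por_data crimes_por_data_alt
  simp only [PySem.List.foldl_append_singleton_eq_map, List.nil_append, PySem.Dict.keys_counter,
    PySem.Dict.getD_counter]
  set ds := tabela.map (fun item => pvNovoFormato (pvCrimeDate item)) with hds
  set s := PySem.List.sorted ds (fun x => x) with hs
  have hperm : s.Perm ds := PySem.List.sorted_perm _ _ _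
  have hpw : s.Pairwise (· ≤ ·) := PySem.List.sorted_pairwise ds (fun x => x)
  refine Prod.ext ?_ ?_
  · exact pv_sorted_set_perm ds
  · show pvRunLengths s = _
    rw [pv_runLengths_eq s.length s le_rfl hpw, pv_sorted_set_perm ds]
    apply List.map_congr_left
    intro d _
    simp [hperm.count_eq]
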